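-- pv_equiv track=rewrite | github.com/lurenxing628/---- | core/services/scheduler/gantt_critical_chain.py | _build_process_prev
-- ===== SOURCE A (Python) =====
-- from typing import Any, Dict, List, Optional, Tuple
--
-- def _build_process_prev(nodes: Dict[str, Dict[str, Any]]) -> Dict[str, str]:
--     proc_groups: Dict[Tuple[str, str], List[Dict[str, Any]]] = {}
--     for n in nodes.values():
--         bid = str(n.get("batch_id") or "").strip()
--         if not bid:
--             continue
--         key = (bid, str(n.get("piece_id") or "").strip())
--         proc_groups.setdefault(key, []).append(n)
--
--     proc_prev: Dict[str, str] = {}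
--     for _, items in proc_groups.items():
--         items.sort(key=lambda x: (int(x.get("seq") or 0), x.get("start"), str(x.get("id") or "")))
--         prev: Optional[Dict[str, Any]] = None
--         for n in items:
--             if prev:
--                 proc_prev[str(n.get("id") or "")] = str(prev.get("id") or "")
--             prev = n
--
--     return proc_prev
-- ===== SOURCE B (Python) =====
-- from typing import Any, Dict, List, Optional, Tuple
--
--
-- def _build_process_prev(nodes: Dict[str, Dict[str, Any]]) -> Dict[str, str]:
--     def key_of(n: Dict[str, Any]) -> Optional[Tuple[str, str]]:
--         bid = str(n.get("batch_id") or "").strip()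
--         if not bid:
--             return None
--         return (bid, str(n.get("piece_id") or "").strip())
--
--     batch = [(key_of(n), n) for n in nodes.values() if key_of(n) is not None]
--     keys = list(dict.fromkeys(k for k, _ in batch))
--     proc_prev: Dict[str, str] = {}
--     for k in keys:
--         members = sorted((n for kk, n in batch if kk == k),
--                          key=lambda x: (int(x.get("seq") or 0), x.get("start"), str(x.get("id") or "")))
--         for p, n in zip(members, members[1:]):
--             proc_prev[str(n.get("id") or "")] = str(p.get("id") or "")
--     return proc_prev
-- ===== Notes on version B (the rewrite author's own statement) =====
-- stated objective: alternative
-- what changed: Replaces A's mutable setdefault-grouping dict, in-place per-group sort and prev-variable linking loop by a functional pipeline: filter batch nodes into (key, node) pairs, take the ordered dedup of the keys, and for each key sort its filtered members and pair consecutive ones with zip(members, members[1:]).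
import Mathlib
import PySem

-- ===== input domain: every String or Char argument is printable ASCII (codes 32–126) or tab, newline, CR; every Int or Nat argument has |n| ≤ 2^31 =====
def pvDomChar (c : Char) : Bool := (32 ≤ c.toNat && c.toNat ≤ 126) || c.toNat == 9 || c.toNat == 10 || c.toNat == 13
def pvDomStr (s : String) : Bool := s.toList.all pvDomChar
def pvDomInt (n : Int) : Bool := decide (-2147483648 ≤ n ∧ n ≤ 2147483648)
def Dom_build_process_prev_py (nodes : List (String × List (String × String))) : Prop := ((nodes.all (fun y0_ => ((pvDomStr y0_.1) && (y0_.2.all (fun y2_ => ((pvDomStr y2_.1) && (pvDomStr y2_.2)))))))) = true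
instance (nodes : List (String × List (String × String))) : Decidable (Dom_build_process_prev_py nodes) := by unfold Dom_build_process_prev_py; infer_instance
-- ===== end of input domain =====

-- B replaces A's mutable setdefault-grouping/in-place sort/prev-variable loop by a filter + ordered-dedup
-- + per-key sort + zip-consecutive pipeline (alternative decomposition, same results; not claimed faster).


-- ===== PORT A =====
-- shared field accessors (the Python expressions 'n.get(f)', 'str(v or "")', etc., used by both sources)
def pvGetField (n : List (String × String)) (f : String) : Option String :=
  (PySem.Dict.ofList n).get? f
def pvOrEmpty (o : Option String) : String := o.getD ""          -- str(v or "") on an Optional[str]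
def pvBid (n : List (String × String)) : String :=
  PySem.Str.strip (pvOrEmpty (pvGetField n "batch_id"))
def pvPid (n : List (String × String)) : String :=
  PySem.Str.strip (pvOrEmpty (pvGetField n "piece_id"))
def pvId (n : List (String × String)) : String := pvOrEmpty (pvGetField n "id")
-- int(n.get("seq") or 0); PySem.Int.ofStr? = none (Python ValueError) is excluded by Pre_
def pvSeq (n : List (String × String)) : Int :=
  match pvGetField n "seq" with
  | none => 0
  | some v => if v = "" then 0 else (PySem.Int.ofStr? v).getD 0
def pvStart (n : List (String × String)) : Option String := pvGetField n "start"
-- the sort key (int(seq or 0), start, str(id or "")) as a strict comparison; the none/some mixed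
-- cases on a seq tie are where Python raises TypeError (None vs str) — excluded by Pre_
def pvBefore (n m : List (String × String)) : Bool :=
  if pvSeq n < pvSeq m then true
  else if pvSeq m < pvSeq n then false
  else match pvStart n, pvStart m with
    | some a, some b => if a < b then true else if b < a then false else decide (pvId n < pvId m)
    | none, none => decide (pvId n < pvId m)
    | none, some _ => true
    | some _, none => false
-- stable sort by that key (= PySem.List.sorted's insertion-sort shape, cf. sorted_eq_foldl_insertBy)
def pvSortNodes (l : List (List (String × String))) : List (List (String × String)) :=
  l.foldl (fun acc x => PySem.List.insertBy pvBefore x acc) []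

-- A: proc_groups.setdefault(key, []).append(n)
def pvStepGroup (g : PySem.Dict (String × String) (List (List (String × String))))
    (n : List (String × String)) : PySem.Dict (String × String) (List (List (String × String))) :=
  let bid := pvBid n
  if bid = "" then g
  else PySem.Dict.modify g (bid, pvPid n) [] (fun xs => xs ++ [n])

-- A: the inner 'if prev: proc_prev[...] = ...; prev = n' step ('if prev:' tests prev non-None and non-empty)
def pvLinkStep (st : PySem.Dict String String × Option (List (String × String)))
    (n : List (String × String)) : PySem.Dict String String × Option (List (String × String)) :=
  match st.2 with
  | some p => (if p = ([] : List (String × String)) then st.1 else PySem.Dict.insert st.1 (pvId n) (pvId p), some n)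
  | none => (st.1, some n)

-- A: one iteration of 'for _, items in proc_groups.items()'
def pvGroupFoldA (pp : PySem.Dict String String)
    (kv : (String × String) × List (List (String × String))) : PySem.Dict String String :=
  let items := pvSortNodes kv.2
  (items.foldl pvLinkStep (pp, (none : Option (List (String × String))))).1

def build_process_prev_py (nodes : List (String × List (String × String))) : List (String × String) :=
  let proc_groups := ((PySem.Dict.ofList nodes).values).foldl pvStepGroup PySem.Dict.empty
  let proc_prev := proc_groups.items.foldl pvGroupFoldA PySem.Dict.empty
  proc_prev.items

-- ===== PORT B =====
-- B: key_of(n)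
def pvKeyOf (n : List (String × String)) : Option (String × String) :=
  let bid := pvBid n
  if bid = "" then none else some (bid, pvPid n)

-- B: proc_prev[str(n.get("id") or "")] = str(p.get("id") or "") for one (p, n) pair of the zip
def pvEdgeStep (pp : PySem.Dict String String)
    (pn : List (String × String) × List (String × String)) : PySem.Dict String String :=
  PySem.Dict.insert pp (pvId pn.2) (pvId pn.1)

-- B: the body of 'for k in keys:'
def pvGroupFoldB (batch : List ((String × String) × List (String × String)))
    (pp : PySem.Dict String String) (k : String × String) : PySem.Dict String String :=
  let members := pvSortNodes ((batch.filter (fun kn => kn.1 == k)).map (fun kn => kn.2))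
  (members.zip members.tail).foldl pvEdgeStep pp

def build_process_prev_py_alt (nodes : List (String × List (String × String))) : List (String × String) :=
  let batch := ((PySem.Dict.ofList nodes).values).filterMap
      (fun n => (pvKeyOf n).map (fun k => (k, n)))
  let keys := PySem.List.dedup (batch.map (fun kn => kn.1))
  let proc_prev := keys.foldl (pvGroupFoldB batch) PySem.Dict.empty
  proc_prev.items

-- ===== PRECONDITION & SPEC =====
def pvSeqOK (n : List (String × String)) : Bool :=
  match pvGetField n "seq" with
  | none => true
  | some v => v == "" || (PySem.Int.ofStr? v).isSome
def pvHasStart (n : List (String × String)) : Bool := (pvGetField n "start").isSome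

-- Pre_ excludes exactly the inputs where the Python A raises: a batch node whose "seq" is a non-empty
-- non-int-like string (int(...) ValueError), and two batch nodes in the same group with EQUAL seq where
-- one has a "start" key and the other does not (the sort key compares None with str: TypeError).
-- A returns a value on every input satisfying Pre_.
def Pre_build_process_prev_py (nodes : List (String × List (String × String))) : Prop :=
  (∀ n ∈ (PySem.Dict.ofList nodes).values, pvKeyOf n ≠ none → pvSeqOK n = true) ∧
  (∀ n ∈ (PySem.Dict.ofList nodes).values, ∀ m ∈ (PySem.Dict.ofList nodes).values,
      pvKeyOf n ≠ none → pvKeyOf n = pvKeyOf m → pvSeq n = pvSeq m → pvHasStart n = pvHasStart m)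
instance (nodes : List (String × List (String × String))) : Decidable (Pre_build_process_prev_py nodes) := by
  unfold Pre_build_process_prev_py; infer_instance

def pvWitness_build_process_prev_py : (List (String × List (String × String))) :=
  [("a", [("batch_id", "b"), ("id", "1"), ("seq", "1"), ("start", "s")]),
   ("c", [("batch_id", "b"), ("id", "2"), ("seq", "2")])]

def Spec_build_process_prev_py (nodes : List (String × List (String × String))) (out : List (String × String)) : Prop := out = build_process_prev_py_alt nodes
instance (nodes : List (String × List (String × String))) (out : List (String × String)) : Decidable (Spec_build_process_prev_py nodes out) := by unfold Spec_build_process_prev_py; infer_instance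

-- ===== CLAIM (what is proved, stated in full; the proofs are below) =====
def Claim_equal_build_process_prev_py : Prop := ∀ (nodes : List (String × List (String × String))), Dom_build_process_prev_py nodes → Pre_build_process_prev_py nodes → Spec_build_process_prev_py nodes (build_process_prev_py nodes)

-- ===== LEMMAS AND PROOFS =====

-- members of group k, as A's grouping dict collects them
def pvM (k : String × String) (vs : List (List (String × String))) : List (List (String × String)) :=
  vs.filter (fun n => pvKeyOf n == some k)

lemma pvWitness_ok :
    Dom_build_process_prev_py pvWitness_build_process_prev_py ∧
    Pre_build_process_prev_py pvWitness_build_process_prev_py := by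
  constructor <;> decide

lemma link_aux (l : List (List (String × String))) :
    ∀ (p : List (String × String)) (pp : PySem.Dict String String),
      (∀ n ∈ l, n ≠ []) → p ≠ [] →
      (l.foldl pvLinkStep (pp, some p)).1 = ((p :: l).zip l).foldl pvEdgeStep pp := by
  induction l with
  | nil => intro p pp _ _; rfl
  | cons n t ih =>
      intro p pp hl hp
      have hn : n ≠ [] := hl n (by simp)
      have hrec := ih n (PySem.Dict.insert pp (pvId n) (pvId p)) (fun m hm => hl m (by simp [hm])) hn
      simp only [List.foldl_cons, pvLinkStep, List.zip_cons_cons] at *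
      simp [if_neg hp, hrec, pvEdgeStep]

lemma link_eq (l : List (List (String × String))) (pp : PySem.Dict String String)
    (h : ∀ n ∈ l, n ≠ []) :
    (l.foldl pvLinkStep (pp, (none : Option (List (String × String))))).1
      = (l.zip l.tail).foldl pvEdgeStep pp := by
  cases l with
  | nil => rfl
  | cons n t =>
      have := link_aux t n pp (fun m hm => h m (by simp [hm])) (h n (by simp))
      simpa [pvLinkStep] using this

lemma members_eq (k : String × String) (vs : List (List (String × String))) :
    ((vs.filterMap (fun n => (pvKeyOf n).map (fun k' => (k', n)))).filter
        (fun kn => kn.1 == k)).map (fun kn => kn.2) = pvM k vs := by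
  induction vs with
  | nil => rfl
  | cons n t ih =>
      cases h : pvKeyOf n with
      | none => simpa [pvM, List.filterMap_cons, h, List.filter_cons] using ih
      | some k' =>
          by_cases hk : k' = k <;>
            simpa [pvM, List.filterMap_cons, h, List.filter_cons, hk] using ih

lemma batch_fst (vs : List (List (String × String))) :
    (vs.filterMap (fun n => (pvKeyOf n).map (fun k' => (k', n)))).map (fun kn => kn.1)
      = vs.filterMap pvKeyOf := by
  induction vs with
  | nil => rfl
  | cons n t ih => cases h : pvKeyOf n <;> simp [h, ih]

lemma shaped_get? (K : List (String × String))
    (m : String × String → List (List (String × String))) (k : String × String)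
    (hk : k ∈ K) :
    (PySem.Dict.mk (K.map (fun k' => (k', m k')))).get? k = some (m k) := by
  induction K with
  | nil => simp at hk
  | cons a t ih =>
      rw [List.map_cons, PySem.Dict.get?_mk_cons]
      by_cases ha : a = k
      · simp [ha]
      · simp only [beq_iff_eq, ha, if_false]
        exact ih (by
          rcases List.mem_cons.1 hk with h | h
          · exact absurd h.symm ha
          · exact h)

lemma shaped_get?_none (K : List (String × String))
    (m : String × String → List (List (String × String))) (k : String × String)
    (hk : k ∉ K) :
    (PySem.Dict.mk (K.map (fun k' => (k', m k')))).get? k = none := by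
  induction K with
  | nil => rfl
  | cons a t ih =>
      rw [List.map_cons, PySem.Dict.get?_mk_cons]
      have ha : ¬ (a = k) := fun h => hk (h ▸ List.mem_cons_self)
      simp only [beq_iff_eq, ha, if_false]
      exact ih (fun h => hk (List.mem_cons_of_mem _ h))

lemma dedup_append_singleton (xs : List (String × String)) (k : String × String) :
    PySem.List.dedup (xs ++ [k]) =
      if k ∈ xs then PySem.List.dedup xs else PySem.List.dedup xs ++ [k] := by
  have h1 : PySem.List.dedup (xs ++ [k]) = PySem.Set.add (PySem.Set.ofList xs) k := by
    simp [PySem.List.dedup, PySem.Set.ofList_eq_foldl, List.foldl_append]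
  rw [h1]
  by_cases hm : k ∈ xs
  · simp [PySem.Set.add, PySem.List.dedup, hm]
  · simp [PySem.Set.add, PySem.List.dedup, hm]


lemma pvM_nil_of_not_mem (k : String × String) (vs : List (List (String × String)))
    (hk : k ∉ vs.filterMap pvKeyOf) : pvM k vs = [] := by
  rw [pvM, List.filter_eq_nil_iff]
  intro n hn hpred
  exact hk (List.mem_filterMap.2 ⟨n, hn, by simpa using hpred⟩)


set_option maxHeartbeats 1000000 in
lemma groups_items (vs : List (List (String × String))) :
    (vs.foldl pvStepGroup PySem.Dict.empty).items
      = (PySem.List.dedup (vs.filterMap pvKeyOf)).map (fun k => (k, pvM k vs)) := by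
  induction vs using List.reverseRecOn with
  | nil => rfl
  | append_singleton vs n ih =>
      simp only [List.foldl_append, List.foldl_cons, List.foldl_nil]
      cases h : pvKeyOf n with
      | none =>
          have hb : pvBid n = "" := by
            by_contra hb
            simp [pvKeyOf, hb] at h
          have hM : ∀ k, pvM k (vs ++ [n]) = pvM k vs := by
            intro k
            simp [pvM, List.filter_append, h]
          simp only [List.filterMap_append,
            show List.filterMap pvKeyOf [n] = [] by simp [h], List.append_nil]
          rw [show pvStepGroup (vs.foldl pvStepGroup PySem.Dict.empty) n
              = vs.foldl pvStepGroup PySem.Dict.empty by simp [pvStepGroup, hb], ih]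
          exact List.map_congr_left (fun k _ => by rw [hM k])
      | some k0 =>
          have hb : pvBid n ≠ "" := by
            intro hb
            simp [pvKeyOf, hb] at h
          have hk0 : (pvBid n, pvPid n) = k0 := by
            simpa [pvKeyOf, hb] using h
          have hstep : pvStepGroup (vs.foldl pvStepGroup PySem.Dict.empty) n
              = PySem.Dict.insert (vs.foldl pvStepGroup PySem.Dict.empty) k0
                  ((vs.foldl pvStepGroup PySem.Dict.empty).getD k0 [] ++ [n]) := by
            simp [pvStepGroup, hb, hk0, PySem.Dict.modify]
          have hg : vs.foldl pvStepGroup PySem.Dict.empty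
              = PySem.Dict.mk ((PySem.List.dedup (vs.filterMap pvKeyOf)).map
                  (fun k => (k, pvM k vs))) := PySem.Dict.ext ih
          have hMk0 : pvM k0 (vs ++ [n]) = pvM k0 vs ++ [n] := by
            simp [pvM, List.filter_append, h]
          have hMne : ∀ k, k ≠ k0 → pvM k (vs ++ [n]) = pvM k vs := by
            intro k hk
            simp [pvM, List.filter_append, h, Ne.symm hk]
          rw [hstep, hg, List.filterMap_append,
            show List.filterMap pvKeyOf [n] = [k0] by simp [h],
            dedup_append_singleton]
          by_cases hK : k0 ∈ vs.filterMap pvKeyOf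
          · have hKd : k0 ∈ PySem.List.dedup (vs.filterMap pvKeyOf) := by
              simpa [PySem.List.mem_dedup] using hK
            have hget := shaped_get? (PySem.List.dedup (vs.filterMap pvKeyOf))
              (fun k => pvM k vs) k0 hKd
            have hcont : (PySem.Dict.mk ((PySem.List.dedup (vs.filterMap pvKeyOf)).map
                (fun k => (k, pvM k vs)))).contains k0 = true := by
              rw [PySem.Dict.contains_eq_isSome_get?, hget]; rfl
            simp only [PySem.Dict.insert, hcont, if_pos, PySem.Dict.getD, hget,
              Option.getD_some, if_pos hK, List.map_map]
            refine List.map_congr_left (fun k hkmem => ?_)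
            by_cases hk : k = k0
            · subst hk
              simp [hMk0]
            · simp [Function.comp, hk, hMne k hk]
          · have hKd : k0 ∉ PySem.List.dedup (vs.filterMap pvKeyOf) := by
              simpa [PySem.List.mem_dedup] using hK
            have hget := shaped_get?_none (PySem.List.dedup (vs.filterMap pvKeyOf))
              (fun k => pvM k vs) k0 hKd
            have hcont : (PySem.Dict.mk ((PySem.List.dedup (vs.filterMap pvKeyOf)).map
                (fun k => (k, pvM k vs)))).contains k0 = false := by
              rw [PySem.Dict.contains_eq_isSome_get?, hget]; rfl
            have hM0 : pvM k0 vs = [] := pvM_nil_of_not_mem k0 vs hK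
            simp only [PySem.Dict.insert, hcont, Bool.false_eq_true,
              PySem.Dict.getD, hget, Option.getD_none, if_neg hK, List.map_append,
              List.map_cons, List.map_nil, hM0, List.nil_append, hMk0]
            rw [if_neg not_false]
            show _ ++ _ = _ ++ _
            congr 1
            refine List.map_congr_left (fun k hkmem => ?_)
            have hk : k ≠ k0 := fun he => hKd (he ▸ hkmem)
            rw [hMne k hk]

lemma nonempty_of_key (n : List (String × String)) (k : String × String)
    (h : pvKeyOf n = some k) : n ≠ [] := by
  rintro rfl
  have h0 : pvKeyOf ([] : List (String × String)) = none := by decide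
  rw [h0] at h
  simp at h

lemma mem_foldl_insertBy (l : List (List (String × String))) :
    ∀ (acc : List (List (String × String))) (y : List (String × String)),
      y ∈ l.foldl (fun acc x => PySem.List.insertBy pvBefore x acc) acc → y ∈ acc ∨ y ∈ l := by
  induction l with
  | nil => intro acc y h; exact Or.inl h
  | cons x t ih =>
      intro acc y h
      rcases ih _ y h with h' | h'
      · rcases (PySem.List.mem_insertBy _ _ _ _).1 h' with rfl | h''
        · exact Or.inr (by simp)
        · exact Or.inl h''
      · exact Or.inr (by simp [h'])

lemma mem_sortNodes {l : List (List (String × String))} {y : List (String × String)}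
    (h : y ∈ pvSortNodes l) : y ∈ l := by
  rcases mem_foldl_insertBy l [] y h with h' | h'
  · simp at h'
  · exact h'

-- ===== VERDICT (by name: the statement is the Claim_ definition above) =====
theorem build_process_prev_py_spec : Claim_equal_build_process_prev_py := by
  intro nodes _ _
  unfold Spec_build_process_prev_py build_process_prev_py build_process_prev_py_alt
  dsimp only
  congr 1
  rw [groups_items, List.foldl_map, batch_fst]
  refine PySem.List.foldl_congr_mem _ _ _ _ (fun pp k hk => ?_)
  have hmem := members_eq k ((PySem.Dict.ofList nodes).values)
  have hne : ∀ n ∈ pvSortNodes (pvM k ((PySem.Dict.ofList nodes).values)), n ≠ [] := by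
    intro n hn
    have hn' := mem_sortNodes hn
    have hp := List.of_mem_filter hn'
    exact nonempty_of_key n k (by simpa using hp)
  calc pvGroupFoldA pp (k, pvM k ((PySem.Dict.ofList nodes).values))
      = ((pvSortNodes (pvM k ((PySem.Dict.ofList nodes).values))).foldl pvLinkStep
          (pp, (none : Option (List (String × String))))).1 := rfl
    _ = _ := by
          rw [link_eq _ _ hne]
          simp only [pvGroupFoldB, hmem]
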